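-- pv_equiv track=rewrite | github.com/jclements3/trefoil | handout/trefoil_midi.py | assign_octaves
-- ===== SOURCE A (Python) =====
-- SCALE = ['C','D','E','F','G','A','B']
--
-- def assign_octaves(notes, base_octave=3):
--     octaves=[]; octave=base_octave; prev_idx=-1
--     for note in notes:
--         idx = SCALE.index(note)
--         if prev_idx != -1 and idx <= prev_idx:
--             octave += 1
--         octaves.append((note, octave))
--         prev_idx = idx
--     return octaves
-- ===== SOURCE B (Python) =====
-- SCALE = ['C','D','E','F','G','A','B']
--
-- def assign_octaves(notes, base_octave=3):
--     idxs = [SCALE.index(n) for n in notes]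
--     steps = [1 if b <= a else 0 for a, b in zip(idxs, idxs[1:])]
--     octs = [base_octave]
--     t = base_octave
--     for s in steps:
--         t += s
--         octs.append(t)
--     return list(zip(notes, octs))
-- ===== Notes on version B (the rewrite author's own statement) =====
-- stated objective: alternative
-- what changed: Replaces the fused loop carrying prev_idx/octave state with a map-then-prefix-sum pipeline: precompute scale indices, derive a 0/1 step list from adjacent pairs, prefix-accumulate octaves, and zip with the notes.
import Mathlib
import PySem

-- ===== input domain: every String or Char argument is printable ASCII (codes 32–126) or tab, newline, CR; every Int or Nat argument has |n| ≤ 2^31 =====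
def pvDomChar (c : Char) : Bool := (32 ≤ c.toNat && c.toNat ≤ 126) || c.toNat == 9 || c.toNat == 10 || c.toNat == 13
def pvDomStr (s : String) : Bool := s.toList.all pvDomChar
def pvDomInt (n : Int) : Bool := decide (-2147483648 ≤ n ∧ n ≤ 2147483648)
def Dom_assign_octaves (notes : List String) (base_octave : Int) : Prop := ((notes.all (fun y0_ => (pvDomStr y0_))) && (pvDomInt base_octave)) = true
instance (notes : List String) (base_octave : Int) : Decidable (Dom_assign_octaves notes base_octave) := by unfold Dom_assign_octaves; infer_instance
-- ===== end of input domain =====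

-- B replaces A's fused state-carrying loop by a map / adjacent-step / prefix-accumulate / zip pipeline (objective: alternative, same cost).

-- ===== PORT A =====
def pvSCALE : List String := ["C", "D", "E", "F", "G", "A", "B"]

-- SCALE.index(note): under Pre_ the note is in SCALE, so index? is some; getD 0 is never reached (ValueError excluded by Pre_).
def pvIdx (note : String) : Int := ((PySem.List.index? pvSCALE note).getD 0 : Nat)

def assign_octaves (notes : List String) (base_octave : Int) : List (String × Int) :=
  (notes.foldl
    (fun (st : List (String × Int) × Int × Int) note =>
      let idx : Int := pvIdx note
      let octave : Int := if st.2.2 ≠ -1 ∧ idx ≤ st.2.2 then st.2.1 + 1 else st.2.1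
      (st.1 ++ [(note, octave)], octave, idx))
    ([], base_octave, -1)).1

-- ===== PORT B =====
def assign_octaves_alt (notes : List String) (base_octave : Int) : List (String × Int) :=
  let idxs : List Int := notes.map pvIdx
  -- zip(idxs, idxs[1:]); idxs[1:] is drop 1 (exact: nonnegative start)
  let steps : List Int := (idxs.zip (idxs.drop 1)).map (fun p => if p.2 ≤ p.1 then (1 : Int) else 0)
  let octs : List Int :=
    (steps.foldl (fun (st : List Int × Int) s => (st.1 ++ [st.2 + s], st.2 + s)) ([base_octave], base_octave)).1
  notes.zip octs

-- ===== PRECONDITION & SPEC =====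
-- Pre_ excludes notes outside SCALE, on which A's SCALE.index raises ValueError (B raises there too).
def Pre_assign_octaves (notes : List String) (base_octave : Int) : Prop :=
  ∀ n ∈ notes, n ∈ pvSCALE

instance (notes : List String) (base_octave : Int) : Decidable (Pre_assign_octaves notes base_octave) := by
  unfold Pre_assign_octaves; infer_instance

def pvWitness_assign_octaves : List String × Int := (["C", "E", "D", "C"], 3)

def Spec_assign_octaves (notes : List String) (base_octave : Int) (out : List (String × Int)) : Prop := out = assign_octaves_alt notes base_octave
instance (notes : List String) (base_octave : Int) (out : List (String × Int)) : Decidable (Spec_assign_octaves notes base_octave out) := by unfold Spec_assign_octaves; infer_instance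

-- ===== CLAIM (what is proved, stated in full; the proofs are below) =====
def Claim_equal_assign_octaves : Prop := ∀ (notes : List String) (base_octave : Int), Dom_assign_octaves notes base_octave → Pre_assign_octaves notes base_octave → Spec_assign_octaves notes base_octave (assign_octaves notes base_octave)

-- ===== LEMMAS AND PROOFS =====

-- Recursive characterisation of A's loop body.
def goA (ns : List String) (octave prev : Int) : List (String × Int) :=
  match ns with
  | [] => []
  | n :: t =>
    let idx := pvIdx n
    let oct := if prev ≠ -1 ∧ idx ≤ prev then octave + 1 else octave
    (n, oct) :: goA t oct idx

theorem foldlA_eq (ns : List String) (acc : List (String × Int)) (octave prev : Int) :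
    (ns.foldl
      (fun (st : List (String × Int) × Int × Int) note =>
        let idx : Int := pvIdx note
        let octave : Int := if st.2.2 ≠ -1 ∧ idx ≤ st.2.2 then st.2.1 + 1 else st.2.1
        (st.1 ++ [(note, octave)], octave, idx))
      (acc, octave, prev)).1 = acc ++ goA ns octave prev := by
  induction ns generalizing acc octave prev with
  | nil => simp [goA]
  | cons n t ih => simp [goA, List.foldl, ih]

-- Recursive characterisation of B's prefix-accumulate over the step list.
def goB (ns : List String) (t prev : Int) : List (String × Int) :=
  match ns with
  | [] => []
  | n :: rest =>
    let s : Int := if pvIdx n ≤ prev then 1 else 0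
    (n, t + s) :: goB rest (t + s) (pvIdx n)

theorem pvIdx_nonneg (n : String) : 0 ≤ pvIdx n := by
  unfold pvIdx; positivity

-- B's fold over steps, then zip, equals goB (zip truncated by octs starting at [t]).
def tailFrom : List Int → Int → List Int
  | [], _ => []
  | s :: l, t => (t + s) :: tailFrom l (t + s)

theorem foldB_eq (l : List Int) (acc : List Int) (t : Int) :
    (l.foldl (fun (st : List Int × Int) s => (st.1 ++ [st.2 + s], st.2 + s)) (acc, t)).1
      = acc ++ tailFrom l t := by
  induction l generalizing acc t with
  | nil => simp [tailFrom]
  | cons s l ih => simp [tailFrom, List.foldl, ih]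

theorem zip_tail (ns : List String) (t prev : Int) :
    ns.zip (tailFrom (((prev :: ns.map pvIdx).zip (ns.map pvIdx)).map
        (fun p => if p.2 ≤ p.1 then (1 : Int) else 0)) t) = goB ns t prev := by
  induction ns generalizing t prev with
  | nil => simp [goB]
  | cons n rest ih =>
    simp only [List.map, goB, List.zip]
    exact congrArg _ (ih _ _)

theorem goA_eq_goB (ns : List String) (t prev : Int) (hprev : 0 ≤ prev) :
    goA ns t prev = goB ns t prev := by
  induction ns generalizing t prev with
  | nil => rfl
  | cons n rest ih =>
    simp only [goA, goB]
    have hne : prev ≠ -1 := by omega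
    by_cases hle : pvIdx n ≤ prev
    · simp [hne, hle, ih _ _ (pvIdx_nonneg n)]
    · simp [hne, hle, ih _ _ (pvIdx_nonneg n)]

theorem main_eq (notes : List String) (base : Int) :
    assign_octaves notes base = assign_octaves_alt notes base := by
  cases notes with
  | nil => rfl
  | cons n rest =>
    unfold assign_octaves assign_octaves_alt
    rw [foldlA_eq]
    have hA : goA (n :: rest) base (-1) = (n, base) :: goA rest base (pvIdx n) := by
      have h1 : ¬ ((-1 : Int) ≠ -1 ∧ pvIdx n ≤ -1) := by
        intro h; exact h.1 rfl
      simp only [goA, if_neg h1]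
    rw [hA, goA_eq_goB rest base (pvIdx n) (pvIdx_nonneg n)]
    simp only [List.map_cons, List.drop_succ_cons, List.drop_zero, List.zip_cons_cons,
      foldB_eq, List.singleton_append]
    rw [zip_tail rest base (pvIdx n)]; rfl

-- ===== VERDICT (by name: the statement is the Claim_ definition above) =====
theorem assign_octaves_spec : Claim_equal_assign_octaves := by
  intro notes base _ _
  unfold Spec_assign_octaves
  exact main_eq notes base
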